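-- pv_equiv track=rewrite | github.com/Th3will/CsvGen | systemFunctionGen/imdFunc.py | genImdAry
-- ===== SOURCE A (Python) =====
-- def genImdAry(time):
--     imdAry = []
--     for i in range(len(time)):
--         imdAry.append([
--             Isolation(i),
--             IsolationStates(i),
--             Hardware_Error(i),
--             Touch_energy_fault(i),
--             High_Uncertainty(i),
--             Exc_off(i),
--             High_Battery_Voltage(i),
--             Low_Battery_Voltage(i),
--             Age(i)
--         ])
--     return imdAry
--
-- def Isolation(x):
--     return 0
--
-- def IsolationStates(x):
--     return 0
--
-- def Hardware_Error(x):
--     return 0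
--
-- def Touch_energy_fault(x):
--     return 0
--
-- def High_Uncertainty(x):
--     return 0
--
-- def Exc_off(x):
--     return 0
--
-- def High_Battery_Voltage(x):
--     return 0
--
-- def Low_Battery_Voltage(x):
--     return 0
--
-- def Age(x):
--     if x == 2:
--         return 2000
--     return 0
-- ===== SOURCE B (Python) =====
-- def genImdAry(time):
--     n = len(time)
--     if n <= 2:
--         return [[0] * 9 for _ in range(n)]
--     zero_row = lambda: [0] * 9
--     prefix = [zero_row() for _ in range(2)]
--     special = [0] * 8 + [2000]
--     suffix = [zero_row() for _ in range(n - 3)]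
--     return prefix + [special] + suffix
-- ===== Notes on version B (the rewrite author's own statement) =====
-- stated objective: alternative
-- what changed: A loops over every index evaluating nine helper functions per row with an i==2 branch; B never iterates with a branch at all: it assembles the answer as a concatenation of three independently built segments (two zero rows, the one special row ending in 2000, and the remaining zero rows), with a separate uniform-zero case for fewer than three rows.
import Mathlib
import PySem

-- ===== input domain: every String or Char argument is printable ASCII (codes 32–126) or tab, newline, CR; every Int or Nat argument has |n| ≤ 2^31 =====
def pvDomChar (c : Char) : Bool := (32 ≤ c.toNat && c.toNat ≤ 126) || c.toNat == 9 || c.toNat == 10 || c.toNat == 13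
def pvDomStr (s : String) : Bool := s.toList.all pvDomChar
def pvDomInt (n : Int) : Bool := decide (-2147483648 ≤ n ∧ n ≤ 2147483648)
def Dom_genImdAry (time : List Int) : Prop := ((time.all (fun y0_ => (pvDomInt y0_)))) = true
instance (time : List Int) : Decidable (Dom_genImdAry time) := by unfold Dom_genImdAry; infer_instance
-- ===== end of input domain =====

-- B replaces A's per-row loop with nine helper calls and an i==2 branch by a branch-free
-- concatenation of three segments (two zero rows, the special row, the remaining zero rows); objective: alternative.

-- ===== PORT A =====
def Isolation (_ : Int) : Int := 0
def IsolationStates (_ : Int) : Int := 0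
def Hardware_Error (_ : Int) : Int := 0
def Touch_energy_fault (_ : Int) : Int := 0
def High_Uncertainty (_ : Int) : Int := 0
def Exc_off (_ : Int) : Int := 0
def High_Battery_Voltage (_ : Int) : Int := 0
def Low_Battery_Voltage (_ : Int) : Int := 0
def Age (x : Int) : Int := if x = 2 then 2000 else 0

def genImdAry (time : List Int) : List (List Int) :=
  (PySem.List.pyRange 0 (time.length : Int) 1).foldl
    (fun imdAry i => imdAry ++
      [[Isolation i, IsolationStates i, Hardware_Error i, Touch_energy_fault i,
        High_Uncertainty i, Exc_off i, High_Battery_Voltage i, Low_Battery_Voltage i, Age i]]) []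

-- ===== PORT B =====
def genImdAry_alt (time : List Int) : List (List Int) :=
  let n := time.length
  if n ≤ 2 then List.replicate n (List.replicate 9 (0 : Int))
  else
    let pre := List.replicate 2 (List.replicate 9 (0 : Int))
    let spec := List.replicate 8 (0 : Int) ++ [2000]
    let suf := List.replicate (n - 3) (List.replicate 9 (0 : Int))
    pre ++ [spec] ++ suf

-- ===== PRECONDITION & SPEC =====
def Spec_genImdAry (time : List Int) (out : List (List Int)) : Prop := out = genImdAry_alt time
instance (time : List Int) (out : List (List Int)) : Decidable (Spec_genImdAry time out) := by unfold Spec_genImdAry; infer_instance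

-- ===== CLAIM (what is proved, stated in full; the proofs are below) =====
def Claim_equal_genImdAry : Prop := ∀ (time : List Int), Dom_genImdAry time → Spec_genImdAry time (genImdAry time)

-- ===== LEMMAS AND PROOFS =====

def pvAltN (n : Nat) : List (List Int) :=
  if n ≤ 2 then List.replicate n (List.replicate 9 (0 : Int))
  else List.replicate 2 (List.replicate 9 (0 : Int)) ++
       [List.replicate 8 (0 : Int) ++ [2000]] ++
       List.replicate (n - 3) (List.replicate 9 (0 : Int))

def pvFoldA (n : Nat) : List (List Int) :=
  (PySem.List.pyRange 0 (n : Int) 1).foldl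
    (fun imdAry i => imdAry ++
      [[Isolation i, IsolationStates i, Hardware_Error i, Touch_energy_fault i,
        High_Uncertainty i, Exc_off i, High_Battery_Voltage i, Low_Battery_Voltage i, Age i]]) []

theorem pvFoldA_succ (n : Nat) : pvFoldA (n + 1) = pvFoldA n ++
    [[0, 0, 0, 0, 0, 0, 0, 0, Age (n : Int)]] := by
  unfold pvFoldA
  have h : ((n + 1 : Nat) : Int) = (n : Int) + 1 := by push_cast; ring
  rw [h, PySem.List.pyRange_one_succ_right (by exact_mod_cast Nat.zero_le n), List.foldl_append]
  simp [Isolation, IsolationStates, Hardware_Error, Touch_energy_fault, High_Uncertainty,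
    Exc_off, High_Battery_Voltage, Low_Battery_Voltage]

theorem pvMain (n : Nat) : pvFoldA n = pvAltN n := by
  induction n with
  | zero => decide
  | succ n ih =>
    rw [pvFoldA_succ, ih]
    match n with
    | 0 => decide
    | 1 => decide
    | 2 => decide
    | (m + 3) =>
      unfold pvAltN
      have hage : Age ((m + 3 : Nat) : Int) = 0 := by
        unfold Age
        have h2 : ¬ ((m : Int) + 3 = 2) := by omega
        push_cast
        simp [h2]
      rw [hage]
      simp only [show ¬ (m + 3 ≤ 2) from by omega, show ¬ (m + 3 + 1 ≤ 2) from by omega]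
      rw [show m + 3 + 1 - 3 = (m + 3 - 3) + 1 from by omega]
      simp [List.replicate_succ']

-- ===== VERDICT (by name: the statement is the Claim_ definition above) =====
theorem genImdAry_spec : Claim_equal_genImdAry := by
  intro time _
  unfold Spec_genImdAry genImdAry genImdAry_alt
  exact pvMain time.length
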